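-- pv_equiv track=rewrite | github.com/Abhijnan1234/WomenSafety | CAM02/logic.py | get_most_indecent_gesture
-- ===== SOURCE A (Python) =====
-- THREAT_LEVELS = {
--     "RAISED_HAND": "RED",
--     "PUSHING": "RED",
--     "PUNCHING": "RED",
--     "SLAPPING": "RED",
--     "GRABBING": "RED",
--     "CHASING": "RED",
--     "BLOCKING_WAY": "RED",
--     "INTIMIDATING_POSTURE": "RED",
--     "STARING": "YELLOW",
--     "LOITERING": "YELLOW",
--     "FOLLOWING": "YELLOW",
--     "HOVERING": "YELLOW",
--     "POINTING": "YELLOW",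
--     "WAVING_FOR_HELP": "GREEN",
--     "HANDS_UP": "GREEN",
--     "CALLING_PHONE": "GREEN",
--     "RUNNING_AWAY": "GREEN",
--     "FALLING": "GREEN",
--     "HAND_SIGNAL_SOS": "GREEN",
--     "WALKING": "GREEN",
--     "STANDING": "GREEN",
--     "SITTING": "GREEN",
--     "TALKING": "GREEN",
--     "GESTURING_CASUALLY": "GREEN"
-- }
--
-- def get_most_indecent_gesture(clusters, nodes):
--     # Priority: RED > YELLOW > GREEN
--     priority = {"RED": 3, "YELLOW": 2, "GREEN": 1}
--     indecent_gesture = "WALKING"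
--     max_threat = "GREEN"
--     for cluster in clusters:
--         for nid in cluster:
--             gesture = nodes[nid]['attributes'].get('gesture', 'WALKING')
--             threat = THREAT_LEVELS.get(gesture, "GREEN")
--             if priority[threat] > priority[max_threat]:
--                 max_threat = threat
--                 indecent_gesture = gesture
--     return indecent_gesture
-- ===== SOURCE B (Python) =====
-- THREAT_LEVELS = {
--     "RAISED_HAND": "RED",
--     "PUSHING": "RED",
--     "PUNCHING": "RED",
--     "SLAPPING": "RED",
--     "GRABBING": "RED",
--     "CHASING": "RED",
--     "BLOCKING_WAY": "RED",
--     "INTIMIDATING_POSTURE": "RED",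
--     "STARING": "YELLOW",
--     "LOITERING": "YELLOW",
--     "FOLLOWING": "YELLOW",
--     "HOVERING": "YELLOW",
--     "POINTING": "YELLOW",
--     "WAVING_FOR_HELP": "GREEN",
--     "HANDS_UP": "GREEN",
--     "CALLING_PHONE": "GREEN",
--     "RUNNING_AWAY": "GREEN",
--     "FALLING": "GREEN",
--     "HAND_SIGNAL_SOS": "GREEN",
--     "WALKING": "GREEN",
--     "STANDING": "GREEN",
--     "SITTING": "GREEN",
--     "TALKING": "GREEN",
--     "GESTURING_CASUALLY": "GREEN"
-- }
--
-- def get_most_indecent_gesture(clusters, nodes):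
--     # Flatten once (same node-access order as the original), then two find-first scans.
--     gestures = [nodes[nid]['attributes'].get('gesture', 'WALKING')
--                 for cluster in clusters for nid in cluster]
--     red = next((g for g in gestures if THREAT_LEVELS.get(g, "GREEN") == "RED"), None)
--     if red is not None:
--         return red
--     yellow = next((g for g in gestures if THREAT_LEVELS.get(g, "GREEN") == "YELLOW"), None)
--     if yellow is not None:
--         return yellow
--     return "WALKING"
-- ===== Notes on version B (the rewrite author's own statement) =====
-- stated objective: simpler
-- what changed: Replaces the running-max state machine (indecent_gesture/max_threat updated under a priority comparison) with a flatten-then-two-find-first decomposition: first RED gesture, else first YELLOW, else the default WALKING.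
import Mathlib
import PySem

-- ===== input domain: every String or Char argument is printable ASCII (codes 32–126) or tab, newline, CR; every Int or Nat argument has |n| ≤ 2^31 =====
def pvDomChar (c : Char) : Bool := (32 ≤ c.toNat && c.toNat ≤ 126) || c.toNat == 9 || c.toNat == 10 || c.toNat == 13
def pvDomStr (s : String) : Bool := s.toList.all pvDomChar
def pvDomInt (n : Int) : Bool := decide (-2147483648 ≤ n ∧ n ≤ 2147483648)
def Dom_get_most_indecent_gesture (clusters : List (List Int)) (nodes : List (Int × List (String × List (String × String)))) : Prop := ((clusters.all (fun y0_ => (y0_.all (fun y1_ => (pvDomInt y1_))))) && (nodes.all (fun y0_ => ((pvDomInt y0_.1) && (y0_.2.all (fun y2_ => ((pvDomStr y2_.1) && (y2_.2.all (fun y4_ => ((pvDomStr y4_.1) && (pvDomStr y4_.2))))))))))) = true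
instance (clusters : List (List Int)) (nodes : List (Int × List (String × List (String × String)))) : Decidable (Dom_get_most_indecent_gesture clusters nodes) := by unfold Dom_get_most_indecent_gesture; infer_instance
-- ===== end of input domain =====

-- B replaces A's running-max state machine by a flatten-then-two-find-first decomposition (objective: simpler).

-- shared data access: nodes[nid]['attributes'] (none = Python KeyError, excluded by Pre_)
def pvAttrs? (nodes : List (Int × List (String × List (String × String)))) (nid : Int) :
    Option (List (String × String)) :=
  ((PySem.Dict.mk nodes).get? nid).bind (fun node => (PySem.Dict.mk node).get? "attributes")

def pvTHREAT_LEVELS : PySem.Dict String String := PySem.Dict.mk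
  [("RAISED_HAND", "RED"), ("PUSHING", "RED"), ("PUNCHING", "RED"), ("SLAPPING", "RED"),
   ("GRABBING", "RED"), ("CHASING", "RED"), ("BLOCKING_WAY", "RED"),
   ("INTIMIDATING_POSTURE", "RED"), ("STARING", "YELLOW"), ("LOITERING", "YELLOW"),
   ("FOLLOWING", "YELLOW"), ("HOVERING", "YELLOW"), ("POINTING", "YELLOW"),
   ("WAVING_FOR_HELP", "GREEN"), ("HANDS_UP", "GREEN"), ("CALLING_PHONE", "GREEN"),
   ("RUNNING_AWAY", "GREEN"), ("FALLING", "GREEN"), ("HAND_SIGNAL_SOS", "GREEN"),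
   ("WALKING", "GREEN"), ("STANDING", "GREEN"), ("SITTING", "GREEN"),
   ("TALKING", "GREEN"), ("GESTURING_CASUALLY", "GREEN")]

-- ===== PORT A =====
-- literal port of A: running maximum over (indecent_gesture, max_threat); the Option state
-- is none exactly where the Python raises KeyError (excluded by Pre_); priority.getD _ 0 is
-- exact because the threat strings are always keys of the priority dict.
def get_most_indecent_gesture (clusters : List (List Int)) (nodes : List (Int × List (String × List (String × String)))) : String :=
  let priority : PySem.Dict String Int := PySem.Dict.mk [("RED", 3), ("YELLOW", 2), ("GREEN", 1)]
  let res := clusters.foldl (fun st cluster =>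
    cluster.foldl (fun st nid =>
      match st with
      | none => none
      | some (ig, mt) =>
        match pvAttrs? nodes nid with
        | none => none
        | some attrs =>
          let gesture := (PySem.Dict.mk attrs).getD "gesture" "WALKING"
          let threat := pvTHREAT_LEVELS.getD gesture "GREEN"
          if priority.getD threat 0 > priority.getD mt 0 then some (gesture, threat)
          else some (ig, mt)) st)
    (some ("WALKING", "GREEN"))
  match res with
  | some (ig, _) => ig
  | none => "WALKING"   -- unreachable under Pre_ (Python raised)

-- ===== PORT B =====
-- literal port of B: flatten to the gesture list, then find-first RED, else find-first YELLOW.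
def get_most_indecent_gesture_alt (clusters : List (List Int)) (nodes : List (Int × List (String × List (String × String)))) : String :=
  match (clusters.flatMap id).mapM (fun nid =>
      (pvAttrs? nodes nid).map (fun attrs => (PySem.Dict.mk attrs).getD "gesture" "WALKING")) with
  | none => "WALKING"   -- unreachable under Pre_ (Python raised)
  | some gestures =>
    match gestures.find? (fun g => pvTHREAT_LEVELS.getD g "GREEN" == "RED") with
    | some g => g
    | none =>
      match gestures.find? (fun g => pvTHREAT_LEVELS.getD g "GREEN" == "YELLOW") with
      | some g => g
      | none => "WALKING"

-- ===== PRECONDITION & SPEC =====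
-- Pre_ excludes exactly the inputs where Python A raises KeyError: some referenced node id
-- is missing from nodes, or its node dict has no 'attributes' key.
def Pre_get_most_indecent_gesture (clusters : List (List Int)) (nodes : List (Int × List (String × List (String × String)))) : Prop :=
  ∀ cluster ∈ clusters, ∀ nid ∈ cluster, (pvAttrs? nodes nid).isSome = true
instance (clusters : List (List Int)) (nodes : List (Int × List (String × List (String × String)))) : Decidable (Pre_get_most_indecent_gesture clusters nodes) := by unfold Pre_get_most_indecent_gesture; infer_instance

def pvWitness_get_most_indecent_gesture : List (List Int) × (List (Int × List (String × List (String × String)))) :=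
  ([[0, 1]], [(0, [("attributes", [("gesture", "STARING")])]), (1, [("attributes", [])])])

def Spec_get_most_indecent_gesture (clusters : List (List Int)) (nodes : List (Int × List (String × List (String × String)))) (out : String) : Prop := out = get_most_indecent_gesture_alt clusters nodes
instance (clusters : List (List Int)) (nodes : List (Int × List (String × List (String × String)))) (out : String) : Decidable (Spec_get_most_indecent_gesture clusters nodes out) := by unfold Spec_get_most_indecent_gesture; infer_instance

-- ===== CLAIM (what is proved, stated in full; the proofs are below) =====
def Claim_equal_get_most_indecent_gesture : Prop := ∀ (clusters : List (List Int)) (nodes : List (Int × List (String × List (String × String)))), Dom_get_most_indecent_gesture clusters nodes → Pre_get_most_indecent_gesture clusters nodes → Spec_get_most_indecent_gesture clusters nodes (get_most_indecent_gesture clusters nodes)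

-- ===== LEMMAS AND PROOFS =====

-- threat level and priority of a gesture/threat string
def pvLevel (g : String) : String := pvTHREAT_LEVELS.getD g "GREEN"

def pvPrio (t : String) : Int :=
  (PySem.Dict.mk [(("RED" : String), (3 : Int)), ("YELLOW", 2), ("GREEN", 1)]).getD t 0

-- A's loop body on the pure (indecent_gesture, max_threat) state
def pvStepA (st : String × String) (gesture : String) : String × String :=
  if pvPrio (pvLevel gesture) > pvPrio st.2 then (gesture, pvLevel gesture) else st

-- A's loop body on the Option state (none = Python already raised)
def pvOptStep (nodes : List (Int × List (String × List (String × String))))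
    (st : Option (String × String)) (nid : Int) : Option (String × String) :=
  match st with
  | none => none
  | some (ig, mt) =>
    match pvAttrs? nodes nid with
    | none => none
    | some attrs =>
      let gesture := (PySem.Dict.mk attrs).getD "gesture" "WALKING"
      let threat := pvTHREAT_LEVELS.getD gesture "GREEN"
      if (PySem.Dict.mk [(("RED" : String), (3 : Int)), ("YELLOW", 2), ("GREEN", 1)]).getD threat 0 >
          (PySem.Dict.mk [(("RED" : String), (3 : Int)), ("YELLOW", 2), ("GREEN", 1)]).getD mt 0 then
        some (gesture, threat)
      else some (ig, mt)

-- the gesture B reads for one node id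
def pvGest? (nodes : List (Int × List (String × List (String × String)))) (nid : Int) : Option String :=
  (pvAttrs? nodes nid).map (fun attrs => (PySem.Dict.mk attrs).getD "gesture" "WALKING")

lemma pvGet?_mem (l : List (String × String)) (g v : String)
    (h : (PySem.Dict.mk l).get? g = some v) : v ∈ l.map Prod.snd := by
  induction l with
  | nil => simp [PySem.Dict.get?] at h
  | cons p t ih =>
    rw [show PySem.Dict.mk (p :: t) = PySem.Dict.mk ((p.1, p.2) :: t) by simp] at h
    rw [PySem.Dict.get?_mk_cons] at h
    by_cases hc : (p.1 == g) = true
    · simp [hc] at h; simp [← h]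
    · simp [hc] at h; simp [ih h]

lemma pvLevel_cases (g : String) : pvLevel g = "RED" ∨ pvLevel g = "YELLOW" ∨ pvLevel g = "GREEN" := by
  unfold pvLevel
  rw [PySem.Dict.getD_eq_get?_getD]
  cases h : pvTHREAT_LEVELS.get? g with
  | none => simp
  | some v =>
    have hm := pvGet?_mem _ g v h
    simp at hm
    simp
    tauto

lemma pvPrio_red : pvPrio "RED" = 3 := by decide
lemma pvPrio_yellow : pvPrio "YELLOW" = 2 := by decide
lemma pvPrio_green : pvPrio "GREEN" = 1 := by decide

-- characterisation of A's running-max fold: first RED, else first YELLOW, else the default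
lemma pvFoldA_char (gs : List String) : ∀ ig : String,
    ((gs.foldl pvStepA (ig, "GREEN")).1 =
      (match gs.find? (fun g => pvLevel g == "RED") with
       | some g => g
       | none =>
         match gs.find? (fun g => pvLevel g == "YELLOW") with
         | some g => g
         | none => ig)) ∧
    ((gs.foldl pvStepA (ig, "YELLOW")).1 =
      (match gs.find? (fun g => pvLevel g == "RED") with
       | some g => g
       | none => ig)) ∧
    ((gs.foldl pvStepA (ig, "RED")).1 = ig) := by
  induction gs with
  | nil => intro ig; refine ⟨rfl, rfl, rfl⟩
  | cons g0 t ih =>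
    intro ig
    rcases pvLevel_cases g0 with hl | hl | hl
    · refine ⟨?_, ?_, ?_⟩ <;>
        simp [List.foldl_cons, pvStepA, hl, pvPrio_red, pvPrio_yellow,
          pvPrio_green, (ih g0).2.2, (ih ig).2.2]
    · refine ⟨?_, ?_, ?_⟩ <;>
        simp [List.foldl_cons, pvStepA, hl, pvPrio_red, pvPrio_yellow,
          pvPrio_green, (ih g0).2.1, (ih ig).2.1, (ih ig).2.2]
    · refine ⟨?_, ?_, ?_⟩ <;>
        simp [List.foldl_cons, pvStepA, hl, pvPrio_red, pvPrio_yellow,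
          pvPrio_green, (ih ig).1, (ih ig).2.1, (ih ig).2.2]

-- bridge: under Pre_, A's Option fold is the pure fold over B's gesture list
lemma pvBridge (nodes : List (Int × List (String × List (String × String)))) :
    ∀ (l : List Int) (st : String × String),
      (∀ nid ∈ l, (pvAttrs? nodes nid).isSome = true) →
      ∃ gs, l.mapM (pvGest? nodes) = some gs ∧
        l.foldl (pvOptStep nodes) (some st) = some (gs.foldl pvStepA st) := by
  intro l
  induction l with
  | nil => intro st _; exact ⟨[], rfl, rfl⟩
  | cons x t ih =>
    intro st h
    obtain ⟨attrs, hA⟩ := Option.isSome_iff_exists.mp (h x (List.mem_cons_self))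
    set gesture := (PySem.Dict.mk attrs).getD "gesture" "WALKING" with hg
    have hstep : pvOptStep nodes (some st) x = some (pvStepA st gesture) := by
      cases st with
      | mk ig mt =>
        simp only [pvOptStep, hA, pvStepA, pvLevel, pvPrio, hg]
        split_ifs <;> rfl
    obtain ⟨gs, hmap, hfold⟩ := ih (pvStepA st gesture) (fun nid hn => h nid (List.mem_cons_of_mem _ hn))
    refine ⟨gesture :: gs, ?_, ?_⟩
    · simp [List.mapM_cons, pvGest?, hA, hmap, hg]
    · simp [List.foldl_cons, hstep, hfold]

-- nested fold over clusters = fold over the flattened id list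
lemma pvFoldFlat {α : Type} (f : α → Int → α) :
    ∀ (clusters : List (List Int)) (init : α),
      clusters.foldl (fun st c => c.foldl f st) init = (clusters.flatMap id).foldl f init := by
  intro clusters
  induction clusters with
  | nil => intro init; rfl
  | cons c t ih => intro init; simp [List.foldl_cons, List.flatMap_cons, List.foldl_append, ih]

theorem get_most_indecent_gesture_spec : Claim_equal_get_most_indecent_gesture := by
  intro clusters nodes _dom hpre
  unfold Spec_get_most_indecent_gesture
  have hpre' : ∀ nid ∈ clusters.flatMap id, (pvAttrs? nodes nid).isSome = true := by
    intro nid hn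
    obtain ⟨c, hc, hn'⟩ := List.mem_flatMap.mp hn
    exact hpre c hc nid hn'
  obtain ⟨gs, hmap, hfold⟩ := pvBridge nodes (clusters.flatMap id) ("WALKING", "GREEN") hpre'
  have hA : get_most_indecent_gesture clusters nodes =
      (gs.foldl pvStepA ("WALKING", "GREEN")).1 := by
    show (match clusters.foldl (fun st c => c.foldl (pvOptStep nodes) st)
            (some (("WALKING" : String), ("GREEN" : String))) with
          | some (ig, _) => ig
          | none => "WALKING") = _
    rw [pvFoldFlat, hfold]
  have hB : get_most_indecent_gesture_alt clusters nodes =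
      (match gs.find? (fun g => pvLevel g == "RED") with
       | some g => g
       | none =>
         match gs.find? (fun g => pvLevel g == "YELLOW") with
         | some g => g
         | none => "WALKING") := by
    show (match (clusters.flatMap id).mapM (pvGest? nodes) with
          | none => "WALKING"
          | some gestures =>
            match gestures.find? (fun g => pvTHREAT_LEVELS.getD g "GREEN" == "RED") with
            | some g => g
            | none =>
              match gestures.find? (fun g => pvTHREAT_LEVELS.getD g "GREEN" == "YELLOW") with
              | some g => g
              | none => "WALKING") = _
    rw [hmap]
    rfl
  rw [hA, hB, (pvFoldA_char gs "WALKING").1]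

-- ===== VERDICT (by name: the statement is the Claim_ definition above) =====
-- (the verdict theorem get_most_indecent_gesture_spec is stated directly above)
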